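-- pv_equiv track=rewrite | github.com/robjohncolson/box | build_curriculum.py | remove_comments
-- ===== SOURCE A (Python) =====
-- def remove_comments(text):
--     """
--     Removes JavaScript-style comments from the text, respecting string literals.
--     Handles // and /* */ comments, single and double quotes, and escapes.
--     Preserves newlines for line comments.
--     """
--     result = []
--     i = 0
--     length = len(text)
--     state = 'NORMAL'
--     string_char = None
--     escape = False
--     while i < length:
--         char = text[i]
--         if state == 'NORMAL':
--             if i + 1 < length and text[i:i+2] == '//':
--                 state = 'LINE_COMMENT'
--                 i += 2
--                 continue
--             elif text[i:i+2] == '/*':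
--                 state = 'BLOCK_COMMENT'
--                 i += 2
--                 continue
--             elif char in ('"', "'"):
--                 result.append(char)
--                 state = 'STRING'
--                 string_char = char
--                 escape = False
--                 i += 1
--                 continue
--             else:
--                 result.append(char)
--                 i += 1
--         elif state == 'STRING':
--             result.append(char)
--             i += 1
--             if escape:
--                 escape = False
--             elif char == '\\':
--                 escape = True
--             elif char == string_char and not escape:
--                 state = 'NORMAL'
--                 escape = False
--         elif state == 'LINE_COMMENT':
--             i += 1
--             if char == '\n':
--                 state = 'NORMAL'
--                 result.append('\n')
--         elif state == 'BLOCK_COMMENT':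
--             i += 1
--             if i < length and text[i-1] == '*' and text[i] == '/':
--                 state = 'NORMAL'
--                 i += 1  # skip the /
--     return ''.join(result)
-- ===== SOURCE B (Python) =====
-- def remove_comments(text):
--     """Segment-based comment stripper: str.find locates the next '//', '/*'
--     or quote, whole plain runs are copied as slices instead of char by char."""
--     out = []
--     i = 0
--     n = len(text)
--     while i < n:
--         cands = [p for p in (text.find('//', i), text.find('/*', i),
--                              text.find('"', i), text.find("'", i)) if p != -1]
--         if not cands:
--             out.append(text[i:])
--             break
--         j = min(cands)
--         out.append(text[i:j])
--         if text[j] == '/':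
--             if text[j + 1] == '/':
--                 nl = text.find('\n', j + 2)
--                 if nl == -1:
--                     break
--                 out.append('\n')
--                 i = nl + 1
--             else:
--                 end = text.find('*/', j + 2)
--                 if end == -1:
--                     break
--                 i = end + 2
--         else:
--             q = text[j]
--             k = j + 1
--             while k < n:
--                 c = text[k]
--                 k += 1
--                 if c == '\\':
--                     k += 1
--                 elif c == q:
--                     break
--             out.append(text[j:min(k, n)])
--             i = min(k, n)
--     return ''.join(out)
-- ===== Notes on version B (the rewrite author's own statement) =====
-- stated objective: faster
-- what changed: Replaced the per-character state machine with a segment-copying scanner that uses str.find to jump to the next comment opener or quote and copies whole plain runs, line tails and string bodies as slices.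
import Mathlib
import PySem

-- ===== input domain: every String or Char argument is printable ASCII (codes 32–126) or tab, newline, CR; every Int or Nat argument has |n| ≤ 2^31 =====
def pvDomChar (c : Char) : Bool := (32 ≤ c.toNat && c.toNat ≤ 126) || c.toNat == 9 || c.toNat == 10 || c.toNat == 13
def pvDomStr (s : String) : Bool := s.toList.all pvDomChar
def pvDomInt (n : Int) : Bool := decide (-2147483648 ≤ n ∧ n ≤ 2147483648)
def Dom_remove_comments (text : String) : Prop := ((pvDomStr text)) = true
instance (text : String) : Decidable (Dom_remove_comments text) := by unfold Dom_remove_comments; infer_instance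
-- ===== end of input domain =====

-- B replaces A's per-character state machine with a segment-copying scanner (str.find jumps to the next comment opener or quote, plain runs are copied as slices); objective: faster (measured).

-- ===== PORT A =====
-- A's state variable: NORMAL / STRING(string_char, escape) / LINE_COMMENT / BLOCK_COMMENT
inductive PvStA : Type
  | normal : PvStA
  | strst : Char → Bool → PvStA
  | line : PvStA
  | block : PvStA
deriving DecidableEq

-- the while loop of A: one clause per (state, lookahead) branch, in A's order
def pvGoA : List Char → PvStA → List Char
  | [], _ => []
  | '/' :: '/' :: r, .normal => pvGoA r .line
  | '/' :: '*' :: r, .normal => pvGoA r .block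
  | c :: rest, .normal =>
      if c = '"' ∨ c = '\'' then c :: pvGoA rest (.strst c false)
      else c :: pvGoA rest .normal
  | c :: rest, .strst q esc =>
      c :: (if esc then pvGoA rest (.strst q false)
            else if c = '\\' then pvGoA rest (.strst q true)
            else if c = q then pvGoA rest .normal
            else pvGoA rest (.strst q esc))
  | c :: rest, .line =>
      if c = '\n' then '\n' :: pvGoA rest .normal else pvGoA rest .line
  | '*' :: '/' :: r, .block => pvGoA r .normal
  | _ :: rest, .block => pvGoA rest .block

def remove_comments (text : String) : String := String.mk (pvGoA text.toList .normal)

-- ===== PORT B =====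
-- port of Source B's `j = min(cands)` over the four str.find results, plus the slice `text[i:j]`:
-- the plain run before the first token, and the rest starting at that token
def pvSplitPlain : List Char → List Char × List Char
  | [] => ([], [])
  | '/' :: '/' :: r => ([], '/' :: '/' :: r)
  | '/' :: '*' :: r => ([], '/' :: '*' :: r)
  | c :: rest =>
      if c = '"' ∨ c = '\'' then ([], c :: rest)
      else ((pvSplitPlain rest).1.cons c, (pvSplitPlain rest).2)

-- port of Source B's find of the block-comment closer from j+2: drop through it, none if absent
def pvSkipBlock : List Char → Option (List Char)
  | [] => none
  | '*' :: '/' :: r => some r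
  | _ :: rest => pvSkipBlock rest

-- port of Source B's inner string-copy loop (k advances by 2 over a backslash)
def pvTakeStr (q : Char) : List Char → List Char × List Char
  | [] => ([], [])
  | '\\' :: [] => (['\\'], [])
  | '\\' :: c :: rest => ((pvTakeStr q rest).1.cons c |>.cons '\\', (pvTakeStr q rest).2)
  | c :: rest =>
      if c = q then ([c], rest)
      else ((pvTakeStr q rest).1.cons c, (pvTakeStr q rest).2)

theorem pvSplitPlain_snd_le (cs : List Char) : (pvSplitPlain cs).2.length ≤ cs.length := by
  fun_induction pvSplitPlain cs <;> simp_all <;> omega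

theorem pvSkipBlock_le (cs r : List Char) (h : pvSkipBlock cs = some r) :
    r.length + 2 ≤ cs.length := by
  fun_induction pvSkipBlock cs <;> simp_all <;> omega

theorem pvTakeStr_snd_le (q : Char) (cs : List Char) :
    (pvTakeStr q cs).2.length + (pvTakeStr q cs).1.length ≤ cs.length := by
  fun_induction pvTakeStr q cs <;> simp_all <;> omega

-- the outer while loop of Source B
def pvGoB (cs : List Char) : List Char :=
  match h : pvSplitPlain cs with
  | (pre, '/' :: '/' :: r) =>
      match hd : r.dropWhile (· ≠ '\n') with
      | [] => pre
      | _ :: tail => pre ++ '\n' :: pvGoB tail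
  | (pre, '/' :: '*' :: r) =>
      match hb : pvSkipBlock r with
      | none => pre
      | some r' => pre ++ pvGoB r'
  | (pre, q :: r) => pre ++ q :: (pvTakeStr q r).1 ++ pvGoB (pvTakeStr q r).2
  | (pre, []) => pre
termination_by cs.length
decreasing_by
  · have h2 := pvSplitPlain_snd_le cs
    have h3 : (r.dropWhile (· ≠ '\n')).length ≤ r.length := r.length_dropWhile_le _
    rw [h] at h2; simp at h2
    rw [hd] at h3; simp at h3; omega
  · have h2 := pvSplitPlain_snd_le cs
    have h3 := pvSkipBlock_le r r' hb
    rw [h] at h2; simp at h2; omega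
  · have h2 := pvSplitPlain_snd_le cs
    have h3 := pvTakeStr_snd_le q r
    rw [h] at h2; simp at h2; omega

def remove_comments_alt (text : String) : String := String.mk (pvGoB text.toList)

-- ===== PRECONDITION & SPEC =====
def Spec_remove_comments (text : String) (out : String) : Prop := out = remove_comments_alt text
instance (text : String) (out : String) : Decidable (Spec_remove_comments text out) := by unfold Spec_remove_comments; infer_instance

-- ===== CLAIM (what is proved, stated in full; the proofs are below) =====
def Claim_equal_remove_comments : Prop := ∀ (text : String), Dom_remove_comments text → Spec_remove_comments text (remove_comments text)

-- ===== LEMMAS AND PROOFS =====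

theorem pvSplitPlain_append (cs : List Char) :
    (pvSplitPlain cs).1 ++ (pvSplitPlain cs).2 = cs := by
  fun_induction pvSplitPlain cs <;> simp_all

theorem pv_lineLemma (r : List Char) :
    pvGoA r .line = (match r.dropWhile (· ≠ '\n') with
      | [] => [] | _ :: t => '\n' :: pvGoA t .normal) := by
  induction r with
  | nil => simp [pvGoA]
  | cons c rest ih =>
    by_cases hc : c = '\n'
    · subst hc; simp [pvGoA]
    · simp [pvGoA, hc, ih, List.dropWhile_cons]

theorem pv_blockLemma (r : List Char) :
    pvGoA r .block = (match pvSkipBlock r with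
      | none => [] | some r' => pvGoA r' .normal) := by
  fun_induction pvSkipBlock r with
  | case1 => simp [pvGoA]
  | case2 r' => simp [pvGoA]
  | case3 c rest h1 ih =>
    have h2 : pvGoA (c :: rest) PvStA.block = pvGoA rest PvStA.block := by
      rw [pvGoA.eq_def]; split <;> simp_all
    rw [h2, ih]
theorem pv_strLemma (q : Char) (r : List Char) :
    pvGoA r (.strst q false) =
      (pvTakeStr q r).1 ++ pvGoA (pvTakeStr q r).2 .normal := by
  fun_induction pvTakeStr q r with
  | case1 => simp [pvGoA]
  | case2 => simp [pvGoA]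
  | case3 => simp_all [pvGoA]
  | case4 rest h1 h2 =>
    have hq : q ≠ '\\' := by
      cases rest with
      | nil => intro h; exact h1 h rfl
      | cons a b => intro h; exact h2 a b h rfl
    simp [pvGoA, hq]
  | case5 c rest h1 h2 hne ih =>
    have hc : c ≠ '\\' := by
      cases rest with
      | nil => intro h; exact h1 h rfl
      | cons a b => intro h; exact h2 a b h rfl
    simp [pvGoA, hc, hne, ih]

theorem pv_normalSplit (cs : List Char) :
    pvGoA cs .normal =
      (pvSplitPlain cs).1 ++ pvGoA (pvSplitPlain cs).2 .normal := by
  fun_induction pvSplitPlain cs with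
  | case1 => simp [pvGoA]
  | case2 => simp
  | case3 => simp
  | case4 c rest hq => simp
  | case5 c rest h1 h2 hq ih =>
    have hA : pvGoA (c :: rest) PvStA.normal = c :: pvGoA rest PvStA.normal := by
      rw [pvGoA.eq_def]; split <;> simp_all
    simp [hA, ih]

theorem pvSplitPlain_snd_quote (cs : List Char) (c : Char) (r : List Char)
    (h : (pvSplitPlain cs).2 = c :: r) :
    c = '"' ∨ c = '\'' ∨ (c = '/' ∧ ∃ r', r = '/' :: r' ∨ r = '*' :: r') := by
  fun_induction pvSplitPlain cs with
  | case1 => simp_all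
  | case2 => simp_all; exact Or.inr (Or.inr ⟨h.1.symm, _, Or.inl h.2.symm⟩)
  | case3 => simp_all; exact Or.inr (Or.inr ⟨h.1.symm, _, Or.inr h.2.symm⟩)
  | case4 c' rest hq =>
    simp_all; rcases h with ⟨hc, _⟩; subst hc; tauto
  | case5 c' rest h1 h2 hq ih => simp_all
theorem pv_main (cs : List Char) : pvGoA cs .normal = pvGoB cs := by
  have happ := pvSplitPlain_append cs
  rw [pv_normalSplit, pvGoB]
  split
  case h_1 pre r heq =>
    rw [heq] at happ ⊢
    have hlen : r.length + 2 ≤ cs.length := by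
      have := congrArg List.length happ; simp at this; omega
    have h1 : pvGoA ('/' :: '/' :: r) PvStA.normal = pvGoA r PvStA.line := by
      simp [pvGoA]
    simp only [h1, pv_lineLemma]
    cases hdw : List.dropWhile (fun x => decide (x ≠ '\n')) r with
    | nil => simp
    | cons hdc tail =>
      have htl : tail.length < cs.length := by
        have := List.length_dropWhile_le (fun x => decide (x ≠ '\n')) r
        rw [hdw] at this; simp at this; omega
      simp [pv_main tail]
  case h_2 pre r heq =>
    rw [heq] at happ ⊢
    have hlen : r.length + 2 ≤ cs.length := by
      have := congrArg List.length happ; simp at this; omega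
    have h1 : pvGoA ('/' :: '*' :: r) PvStA.normal = pvGoA r PvStA.block := by
      simp [pvGoA]
    simp only [h1, pv_blockLemma]
    cases hsb : pvSkipBlock r with
    | none => simp
    | some r' =>
      have htl : r'.length < cs.length := by
        have := pvSkipBlock_le r r' hsb; omega
      simp [pv_main r']
  case h_3 pre q r h1 h2 heq =>
    rw [heq] at happ ⊢
    have hlen : r.length + 1 ≤ cs.length := by
      have := congrArg List.length happ; simp at this; omega
    have hq : q = '"' ∨ q = '\'' := by
      rcases pvSplitPlain_snd_quote cs q r (by rw [heq]) with h | h | ⟨hc, r', h | h⟩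
      · exact Or.inl h
      · exact Or.inr h
      · exact (h1 r' hc h).elim
      · exact (h2 r' hc h).elim
    have hA : pvGoA (q :: r) PvStA.normal = q :: pvGoA r (.strst q false) := by
      rcases hq with h | h <;> subst h <;> simp [pvGoA]
    have htl : (pvTakeStr q r).2.length < cs.length := by
      have := pvTakeStr_snd_le q r; omega
    simp only [hA, pv_strLemma, pv_main (pvTakeStr q r).2]
    simp
  case h_4 pre heq =>
    rw [heq]
    simp [pvGoA]
termination_by cs.length

-- ===== VERDICT (by name: the statement is the Claim_ definition above) =====
theorem remove_comments_spec : Claim_equal_remove_comments := by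
  intro text _
  unfold Spec_remove_comments remove_comments remove_comments_alt
  rw [pv_main]
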